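-- pv_equiv track=rewrite | github.com/jasonj2333/Python_SPP | iepypm/Rozdzial 3/Przyklad_3.11/zad_b.py | zad_b
-- ===== SOURCE A (Python) =====
-- def zad_b(J, k):
--     W = ''
--     n = len(J)
--     for j in range(k):
--         i = j
--         while i < n:
--             W += J[i]
--             i += k
--     return W
-- ===== SOURCE B (Python) =====
-- def zad_b(J, k):
--     if k <= 0:
--         return ''
--     buckets = [[] for _ in range(k)]
--     for i, c in enumerate(J):
--         buckets[i % k].append(c)
--     return ''.join(''.join(b) for b in buckets)
-- ===== Notes on version B (the rewrite author's own statement) =====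
-- stated objective: alternative
-- what changed: Replaces A's k strided scans over the string with a single forward distribution pass into k buckets (bucket i % k) joined once at the end; same asymptotic cost, inverted loop structure.
import Mathlib
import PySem

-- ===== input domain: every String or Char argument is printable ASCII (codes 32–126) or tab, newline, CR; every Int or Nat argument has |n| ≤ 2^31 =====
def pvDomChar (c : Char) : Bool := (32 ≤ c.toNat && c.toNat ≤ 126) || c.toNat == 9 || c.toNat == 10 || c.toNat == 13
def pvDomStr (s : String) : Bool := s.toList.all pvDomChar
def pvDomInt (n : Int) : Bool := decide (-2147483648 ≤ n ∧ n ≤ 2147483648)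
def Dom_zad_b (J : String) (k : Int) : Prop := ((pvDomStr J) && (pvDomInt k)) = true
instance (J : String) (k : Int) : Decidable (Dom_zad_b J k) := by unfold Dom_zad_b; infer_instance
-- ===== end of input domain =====

-- B replaces A's k strided scans of the string by one forward pass distributing each
-- character into bucket i % k, then joining the buckets once (objective: alternative
-- decomposition, same asymptotic cost).


-- ===== PORT A =====
-- inner 'while i < n: W += J[i]; i += k' (fuel = n+1 only makes the recursion total;
-- with k ≥ 1, as at every call site, it is never exhausted)
def zadWhile (cs : List Char) (k : Int) : Nat → Int → List Char
  | 0, _ => []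
  | f + 1, i =>
    if i < (cs.length : Int) then
      match PySem.List.pyGet? cs i with
      | some c => c :: zadWhile cs k f (i + k)
      | none => []          -- IndexError (unreachable: 0 ≤ i < len at every call)
    else []

def zad_b (J : String) (k : Int) : String :=
  let cs := J.toList
  String.mk ((PySem.List.pyRange 0 k 1).foldl
    (fun W j => W ++ zadWhile cs k (cs.length + 1) j) [])

-- ===== PORT B =====
def zad_b_alt (J : String) (k : Int) : String :=
  if k ≤ 0 then "" else
    let buckets := (PySem.List.enumerate J.toList 0).foldl
      (fun bs p => bs.modify (PySem.Int.mod p.1 k).toNat (· ++ [p.2]))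
      (List.replicate k.toNat ([] : List Char))
    String.mk buckets.flatten

-- ===== PRECONDITION & SPEC =====
def Spec_zad_b (J : String) (k : Int) (out : String) : Prop := out = zad_b_alt J k
instance (J : String) (k : Int) (out : String) : Decidable (Spec_zad_b J k out) := by unfold Spec_zad_b; infer_instance

-- ===== CLAIM (what is proved, stated in full; the proofs are below) =====
def Claim_equal_zad_b : Prop := ∀ (J : String) (k : Int), Dom_zad_b J k → Spec_zad_b J k (zad_b J k)

-- ===== LEMMAS AND PROOFS =====

-- every k'-th element of a list, starting at its head (d = stride - 1)
def strideK (d : Nat) : List Char → List Char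
  | [] => []
  | c :: rest => c :: strideK d (rest.drop d)
termination_by l => l.length
decreasing_by simp

theorem zadWhile_eq_strideK (cs : List Char) (k' : Nat) (hk : 1 ≤ k') :
    ∀ (f i : Nat), cs.length ≤ f + i →
      zadWhile cs (k' : Int) f (i : Int) = strideK (k' - 1) (cs.drop i) := by
  intro f
  induction f with
  | zero =>
    intro i h
    rw [List.drop_eq_nil_of_le (by omega)]
    simp [zadWhile, strideK]
  | succ f ih =>
    intro i h
    by_cases hi : i < cs.length
    · have hget : PySem.List.pyGet? cs (i : Int) = some cs[i] := by
        simp [PySem.List.pyGet?_natCast, List.getElem?_eq_getElem hi]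
      have hdrop : cs.drop i = cs[i] :: cs.drop (i + 1) :=
        List.drop_eq_getElem_cons hi
      have hcast : ((i : Int) + (k' : Int)) = ((i + k' : Nat) : Int) := by push_cast; ring
      rw [zadWhile, if_pos (by exact_mod_cast hi), hget, hcast,
        ih (i + k') (by omega), hdrop, strideK, List.drop_drop]
      have : i + 1 + (k' - 1) = i + k' := by omega
      rw [this]
    · rw [zadWhile, if_neg (by exact_mod_cast hi),
        List.drop_eq_nil_of_le (by omega)]
      simp [strideK]

theorem strideK_append_singleton (k' : Nat) (hk : 1 ≤ k') (l : List Char) (c : Char) :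
    strideK (k' - 1) (l ++ [c]) =
      strideK (k' - 1) l ++ (if l.length % k' = 0 then [c] else []) := by
  have aux : ∀ (m : Nat) (l : List Char) (c : Char), l.length ≤ m →
      strideK (k' - 1) (l ++ [c]) =
        strideK (k' - 1) l ++ (if l.length % k' = 0 then [c] else []) := by
    intro m
    induction m with
    | zero =>
      intro l c h
      have : l = [] := List.eq_nil_of_length_eq_zero (by omega)
      subst this; simp [strideK]
    | succ m ih =>
      intro l c h
      match l with
      | [] => simp [strideK]
      | x :: xs =>
        rw [List.cons_append, strideK, strideK]
        by_cases hlen : k' - 1 ≤ xs.length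
        · rw [List.drop_append_of_le_length hlen, ih _ c (by simp at h ⊢; omega)]
          have hmod : (xs.drop (k' - 1)).length % k' = (x :: xs).length % k' := by
            rw [Nat.mod_eq_sub_mod (by simp; omega : k' ≤ (x :: xs).length)]
            simp; congr 1; omega
          rw [hmod]
          simp
        · have h1 : (xs ++ [c]).drop (k' - 1) = [] :=
            List.drop_eq_nil_of_le (by simp; omega)
          have h2 : xs.drop (k' - 1) = [] := List.drop_eq_nil_of_le (by omega)
          have h3 : (x :: xs).length % k' ≠ 0 := by
            rw [Nat.mod_eq_of_lt (by simp; omega)]; simp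
          rw [h1, h2, if_neg h3]
          simp
  exact aux l.length l c le_rfl

theorem buckets_eq (k' : Nat) (hk : 1 ≤ k') (cs : List Char) :
    (PySem.List.enumerate cs 0).foldl
      (fun bs p => bs.modify (PySem.Int.mod p.1 (k' : Int)).toNat (· ++ [p.2]))
      (List.replicate k' ([] : List Char))
    = (List.range k').map (fun j => strideK (k' - 1) (cs.drop j)) := by
  induction cs using List.reverseRecOn with
  | nil =>
    simp [PySem.List.enumerate, strideK]
  | append_singleton l c ih =>
    rw [PySem.List.enumerate_append, List.foldl_append, ih]
    have hone : PySem.List.enumerate [c] ((0 : Int) + l.length) = [((l.length : Int), c)] := by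
      simp [PySem.List.enumerate]
    rw [hone]
    simp only [List.foldl_cons, List.foldl_nil, PySem.Int.mod_natCast, Int.toNat_natCast]
    apply List.ext_getElem
    · simp
    · intro j hj1 hj2
      simp only [List.length_map, List.length_range] at hj2
      rw [List.getElem_modify, List.getElem_map, List.getElem_map]
      simp only [List.getElem_range]
      by_cases hjl : j ≤ l.length
      · rw [List.drop_append_of_le_length hjl,
          strideK_append_singleton k' hk (l.drop j) c]
        have key : (l.drop j).length % k' = 0 ↔ l.length % k' = j := by
          rw [List.length_drop, ← Nat.dvd_iff_mod_eq_zero,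
            ← Nat.modEq_iff_dvd' hjl]
          unfold Nat.ModEq
          rw [Nat.mod_eq_of_lt hj2]
          exact eq_comm
        by_cases hc : l.length % k' = j
        · rw [if_pos hc, if_pos (key.mpr hc)]
        · rw [if_neg hc, if_neg (fun h => hc (key.mp h))]
          simp
      · have hne : ¬ (l.length % k' = j) := by
          have := Nat.mod_le l.length k'
          omega
        rw [if_neg hne, List.drop_eq_nil_of_le (by omega),
          List.drop_eq_nil_of_le (by simp; omega)]

-- ===== VERDICT (by name: the statement is the Claim_ definition above) =====
theorem zad_b_spec : Claim_equal_zad_b := by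
  intro J k _
  unfold Spec_zad_b zad_b zad_b_alt
  dsimp only
  by_cases hk : k ≤ 0
  · rw [if_pos hk, PySem.List.pyRange_one_eq_nil hk]
    rfl
  · rw [if_neg hk]
    have hk' : 1 ≤ k.toNat := by omega
    have hkk : ((k.toNat : Nat) : Int) = k := Int.toNat_of_nonneg (by omega)
    rw [PySem.List.foldl_append_eq_flatMap, List.nil_append,
      ← hkk]
    simp only [Int.toNat_natCast]
    rw [buckets_eq k.toNat hk' J.toList, PySem.List.pyRange_one,
      List.flatMap_map]
    congr 1
    rw [Int.sub_zero, ← List.map_id' (List.map _ (List.range k.toNat)), List.map_map,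
      List.flatten_eq_flatMap, List.flatMap_map]
    apply List.flatMap_congr
    intro j hj
    simp only [id, Function.comp, Int.zero_add]
    exact zadWhile_eq_strideK J.toList k.toNat hk' (J.toList.length + 1) j (by omega)
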